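-- pv_equiv track=rewrite | github.com/dastronmighty/literate-guacamole | MultiLayerPercpetron/paramters.py | layer_activations_gen
-- ===== SOURCE A (Python) =====
-- def layer_activations_gen(params, activations):
--     params["activations"] = []
--     for i in range(len(params["layers"])):
--         act = "linear"
--         if activations is not None:
--             if len(activations) > i:
--                 act = activations[i]
--         params["activations"].append(act)
--     return params
-- ===== SOURCE B (Python) =====
-- def layer_activations_gen(params, activations):
--     n = len(params["layers"])
--     given = activations if activations is not None else []
--     params["activations"] = list(given[:n]) + ["linear"] * max(0, n - len(given))
--     return params
-- ===== Notes on version B (the rewrite author's own statement) =====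
-- stated objective: simpler
-- what changed: Replaces the per-index loop with its guarded default by one bulk prefix slice of the supplied activations plus one bulk pad of 'linear' defaults, assigned to the key once.
import Mathlib
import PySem

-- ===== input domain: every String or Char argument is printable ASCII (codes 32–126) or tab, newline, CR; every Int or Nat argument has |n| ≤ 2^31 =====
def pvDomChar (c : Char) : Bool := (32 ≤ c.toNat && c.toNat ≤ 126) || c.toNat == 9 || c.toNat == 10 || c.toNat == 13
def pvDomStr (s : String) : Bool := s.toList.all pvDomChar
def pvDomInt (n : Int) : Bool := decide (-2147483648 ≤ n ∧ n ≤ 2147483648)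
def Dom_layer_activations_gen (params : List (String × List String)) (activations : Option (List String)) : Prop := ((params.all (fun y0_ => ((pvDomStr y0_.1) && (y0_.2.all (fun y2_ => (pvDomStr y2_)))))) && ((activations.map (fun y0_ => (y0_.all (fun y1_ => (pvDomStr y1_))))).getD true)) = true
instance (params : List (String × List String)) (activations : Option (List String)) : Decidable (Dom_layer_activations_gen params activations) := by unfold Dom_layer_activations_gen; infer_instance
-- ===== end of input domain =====

-- B builds the activation list in one bulk prefix-slice plus a pad, instead of A's per-index
-- guarded loop (objective: simpler). Both Pythons mutate params in place identically; the
-- equivalence proved here is about the returned dict.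

-- ===== PORT A =====
def layer_activations_gen (params : List (String × List String)) (activations : Option (List String)) : List (String × List String) :=
  let d := PySem.Dict.ofList params
  let d := d.insert "activations" ([] : List String)
  let d := (PySem.List.pyRange 0 ((d.getD "layers" []).length : Int) 1).foldl
    (fun d i =>
      let act := "linear"
      let act := match activations with
        | none => act
        | some acts => if (acts.length : Int) > i then PySem.List.pyGetD acts i act else act
      d.modify "activations" [] (fun xs => xs ++ [act])) d
  d.items

-- ===== PORT B =====
def layer_activations_gen_alt (params : List (String × List String)) (activations : Option (List String)) : List (String × List String) :=
  let d := PySem.Dict.ofList params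
  let n := (d.getD "layers" []).length
  let given := activations.getD []
  let acts := PySem.List.slice given none (some (n : Int)) ++
              List.replicate (max 0 ((n : Int) - (given.length : Int))).toNat "linear"
  (d.insert "activations" acts).items

-- ===== PRECONDITION & SPEC =====
-- Pre_ excludes exactly the inputs where Python A raises KeyError: params without a "layers" key.
def Pre_layer_activations_gen (params : List (String × List String)) (activations : Option (List String)) : Prop :=
  (PySem.Dict.ofList params).contains "layers" = true
instance (params : List (String × List String)) (activations : Option (List String)) : Decidable (Pre_layer_activations_gen params activations) := by unfold Pre_layer_activations_gen; infer_instance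

def pvWitness_layer_activations_gen : (List (String × List String)) × Option (List String) :=
  ([("layers", ["4", "3"])], some ["relu"])

def Spec_layer_activations_gen (params : List (String × List String)) (activations : Option (List String)) (out : List (String × List String)) : Prop := out = layer_activations_gen_alt params activations
instance (params : List (String × List String)) (activations : Option (List String)) (out : List (String × List String)) : Decidable (Spec_layer_activations_gen params activations out) := by unfold Spec_layer_activations_gen; infer_instance

-- ===== CLAIM (what is proved, stated in full; the proofs are below) =====
def Claim_equal_layer_activations_gen : Prop := ∀ (params : List (String × List String)) (activations : Option (List String)), Dom_layer_activations_gen params activations → Pre_layer_activations_gen params activations → Spec_layer_activations_gen params activations (layer_activations_gen params activations)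

-- ===== LEMMAS AND PROOFS =====

-- modify on a key just inserted rewrites that value in place
theorem dict_modify_insert {κ ν : Type} [BEq κ] [LawfulBEq κ] (d : PySem.Dict κ ν) (k : κ) (v d0 : ν) (f : ν → ν) :
    (d.insert k v).modify k d0 f = d.insert k (f v) := by
  simp [PySem.Dict.modify, PySem.Dict.getD_insert_self, PySem.Dict.insert_insert_self]

-- A's append loop on a freshly set key accumulates the mapped list into that key
theorem foldl_modify_append_insert {κ ν : Type} [BEq κ] [LawfulBEq κ] (l : List Int)
    (d : PySem.Dict κ (List ν)) (k : κ) (g : Int → ν) :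
    ∀ v, l.foldl (fun d i => d.modify k [] (fun xs => xs ++ [g i])) (d.insert k v)
      = d.insert k (v ++ l.map g) := by
  induction l with
  | nil => intro v; simp
  | cons i t ih =>
      intro v
      simp only [List.foldl_cons, dict_modify_insert, List.map_cons]
      rw [ih]
      simp

-- the per-index guarded choice over range n is the prefix of acts padded with "linear"
theorem map_act_range (n : Nat) (acts : List String) :
    (List.range n).map (fun (k : Nat) => if (acts.length : Int) > (k : Int) then PySem.List.pyGetD acts (k : Int) "linear" else "linear")
      = acts.take n ++ List.replicate (n - acts.length) "linear" := by
  apply List.ext_getElem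
  · simp [List.length_take]; omega
  · intro k hk1 hk2
    have hkn : k < n := by simpa using hk1
    simp only [List.getElem_map, List.getElem_range]
    by_cases h : k < acts.length
    · rw [if_pos (by exact_mod_cast h), PySem.List.pyGetD_natCast]
      rw [List.getElem_append_left (by simp [List.length_take]; omega)]
      simp [List.getElem_take, List.getD_eq_getElem?_getD, List.getElem?_eq_getElem h]
    · rw [if_neg (by omega), List.getElem_append_right (by simp [List.length_take]; omega)]
      simp

-- ===== VERDICT (by name: the statement is the Claim_ definition above) =====
theorem layer_activations_gen_spec : Claim_equal_layer_activations_gen := by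
  intro params activations _ _
  unfold Spec_layer_activations_gen layer_activations_gen layer_activations_gen_alt
  simp only []
  set d0 := PySem.Dict.ofList params with hd0
  have hne : "layers" ≠ "activations" := by decide
  rw [PySem.Dict.getD_insert, if_neg hne]
  rw [foldl_modify_append_insert]
  congr 1
  rw [PySem.List.pyRange_one]
  simp only [Int.sub_zero, Int.toNat_natCast, List.map_map]
  cases activations with
  | none =>
      simp only [PySem.List.slice_to_natCast, Option.getD_none]
      congr 1
      simp [List.eq_replicate_iff]
  | some acts =>
      simp only [Option.getD_some]
      rw [PySem.List.slice_to_natCast]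
      have : (max 0 (((d0.getD "layers" []).length : Int) - (acts.length : Int))).toNat
           = (d0.getD "layers" []).length - acts.length := by omega
      rw [this, ← map_act_range]
      congr 1
      simp [Function.comp]
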